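-- pv_equiv track=rewrite | github.com/tockata/HackBulgaria | week4/9-Winter-Is-Coming.py | winter_is_coming
-- ===== SOURCE A (Python) =====
-- def winter_is_coming(seasons):
--     counter = 0
--
--     for season in seasons:
--         if season == "winter":
--             counter = 0
--         else:
--             counter += 1
--
--     if counter >= 5:
--         return True
--     else:
--         return False
-- ===== SOURCE B (Python) =====
-- def winter_is_coming(seasons):
--     count = 0
--     for season in reversed(seasons):
--         if season == "winter":
--             break
--         count += 1
--     return count >= 5
-- ===== Notes on version B (the rewrite author's own statement) =====
-- stated objective: alternative
-- what changed: B walks the list backwards and stops at the first "winter" (counting the trailing non-winter seasons), instead of A's full forward sweep with a reset-on-winter accumulator.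
import Mathlib
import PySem

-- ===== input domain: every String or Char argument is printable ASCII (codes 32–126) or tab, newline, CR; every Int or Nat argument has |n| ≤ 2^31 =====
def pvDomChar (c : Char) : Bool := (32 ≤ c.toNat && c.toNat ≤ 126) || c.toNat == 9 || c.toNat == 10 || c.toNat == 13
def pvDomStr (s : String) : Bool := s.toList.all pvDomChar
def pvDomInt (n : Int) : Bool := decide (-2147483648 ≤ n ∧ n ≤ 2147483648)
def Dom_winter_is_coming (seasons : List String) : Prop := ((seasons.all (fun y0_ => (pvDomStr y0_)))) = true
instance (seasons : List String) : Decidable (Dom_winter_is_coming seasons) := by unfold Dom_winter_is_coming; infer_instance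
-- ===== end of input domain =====

-- B traverses the list backwards with early termination at the last "winter"
-- (counting trailing non-winter seasons) instead of A's forward reset-on-winter sweep.


-- ===== PORT A =====
def winter_is_coming (seasons : List String) : Bool :=
  let counter : Int := seasons.foldl (fun counter season =>
    if season == "winter" then 0 else counter + 1) 0
  if counter ≥ 5 then true else false

-- ===== PORT B =====
-- the reversed loop with break: returns count at the first "winter", else at the end
def pvAltLoop (count : Int) : List String → Int
  | [] => count
  | season :: rest => if season == "winter" then count else pvAltLoop (count + 1) rest

def winter_is_coming_alt (seasons : List String) : Bool :=
  decide (pvAltLoop 0 seasons.reverse ≥ 5)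

-- ===== PRECONDITION & SPEC =====
def Spec_winter_is_coming (seasons : List String) (out : Bool) : Prop := out = winter_is_coming_alt seasons
instance (seasons : List String) (out : Bool) : Decidable (Spec_winter_is_coming seasons out) := by unfold Spec_winter_is_coming; infer_instance

-- ===== CLAIM (what is proved, stated in full; the proofs are below) =====
def Claim_equal_winter_is_coming : Prop := ∀ (seasons : List String), Dom_winter_is_coming seasons → Spec_winter_is_coming seasons (winter_is_coming seasons)

-- ===== LEMMAS AND PROOFS =====

-- B's backward loop with an accumulator shifts out of the accumulator
theorem pvAltLoop_shift (c : Int) (l : List String) :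
    pvAltLoop c l = c + pvAltLoop 0 l := by
  induction l generalizing c with
  | nil => simp [pvAltLoop]
  | cons s rest ih =>
    by_cases h : s == "winter" <;> simp [pvAltLoop, h]
    rw [ih (c + 1), ih 1]; ring

-- A's forward accumulator equals B's backward count: snoc induction
theorem counter_eq_alt (l : List String) :
    l.foldl (fun counter season => if season == "winter" then 0 else counter + 1) (0 : Int)
      = pvAltLoop 0 l.reverse := by
  induction l using List.reverseRecOn with
  | nil => simp [pvAltLoop]
  | append_singleton l s ih =>
    rw [List.foldl_append, List.reverse_append]
    by_cases h : s == "winter"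
    · simp [List.foldl, pvAltLoop, h]
    · simp only [List.foldl, h, Bool.false_eq_true, if_false]
      rw [show [s].reverse ++ l.reverse = s :: l.reverse by simp,
          show pvAltLoop 0 (s :: l.reverse) = pvAltLoop 1 l.reverse by simp [pvAltLoop, h],
          pvAltLoop_shift 1, ih]; ring

-- ===== VERDICT (by name: the statement is the Claim_ definition above) =====
theorem winter_is_coming_spec : Claim_equal_winter_is_coming := by
  intro seasons _
  unfold Spec_winter_is_coming winter_is_coming winter_is_coming_alt
  rw [counter_eq_alt]
  by_cases h : pvAltLoop 0 seasons.reverse ≥ 5 <;> simp [h]
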